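-- pv_equiv track=rewrite | github.com/Dae-yangKim/BOJ_2 | python_9/7696.py | solution
-- ===== SOURCE A (Python) =====
-- def solution(n : int):
--     num : int = 1
--     result : int = 1
--
--     while True:
--         if num == n:
--             break
--
--         s = str(result)
--         if len(s) != 1 and len(s) > len(set(list(s))):
--             result += 1
--         else:
--             num += 1
--             result += 1
--
--     return result
-- ===== SOURCE B (Python) =====
-- def solution(n: int):
--     # A returns 1 + the (n-1)-th positive integer whose decimal digits are all
--     # distinct (counting from 1; for n == 1 nothing has been consumed yet).
--     # Instead of testing every integer, generate ONLY the distinct-digit numbers,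
--     # level by level (numbers with k digits, in increasing order), and index in.
--     if n == 1:
--         return 1
--     m = n - 1                      # we need the m-th distinct-digit number
--     count = 0                      # distinct-digit numbers in completed levels
--     level = [(d, [d]) for d in range(1, 10)]   # (value, digits used), increasing
--     while count + len(level) < m:
--         count += len(level)
--         level = [(v * 10 + d, used + [d])
--                  for v, used in level for d in range(10) if d not in used]
--     return level[m - 1 - count][0] + 1
-- ===== Notes on version B (the rewrite author's own statement) =====
-- stated objective: faster
-- what changed: A scans every integer 1,2,3,... testing each via str/set for a repeated digit; B generates only the distinct-digit numbers, level by level (all k-digit ones at once, in increasing order, each carrying its used-digit list), and indexes into the level that contains the answer, so it touches ~m numbers instead of the ~d_m integers A scans.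
import Mathlib
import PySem

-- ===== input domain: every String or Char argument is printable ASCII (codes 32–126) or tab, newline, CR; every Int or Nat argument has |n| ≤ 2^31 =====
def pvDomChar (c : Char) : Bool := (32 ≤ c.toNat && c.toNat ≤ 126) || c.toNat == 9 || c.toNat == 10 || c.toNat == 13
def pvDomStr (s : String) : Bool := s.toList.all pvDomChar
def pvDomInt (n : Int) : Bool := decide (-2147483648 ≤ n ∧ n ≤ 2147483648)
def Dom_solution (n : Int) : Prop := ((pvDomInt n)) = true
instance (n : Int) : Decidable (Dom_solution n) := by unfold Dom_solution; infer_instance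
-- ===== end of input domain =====

-- B replaces A's scan over every integer (testing each for repeated digits) by a
-- level-by-level generation of ONLY the distinct-digit numbers, indexing into the
-- level that contains the answer; measurably faster on large n.

-- ===== PORT A =====
def solutionLoopA (fuel : Nat) (n num result : Int) : Int :=
  match fuel with
  | 0 => result
  | fuel + 1 =>
    if num = n then result
    else
      let s := PySem.Int.toStr result
      if PySem.Str.len s ≠ 1 ∧ PySem.Str.len s > PySem.Set.len (PySem.Set.ofList s.toList) then
        solutionLoopA fuel n num (result + 1)
      else
        solutionLoopA fuel n (num + 1) (result + 1)

def solution (n : Int) : Int := solutionLoopA 10000000000 n 1 1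

-- ===== PORT B =====
def solutionLoopB (fuel : Nat) (m count : Int) (level : List (Int × List Int)) : Int :=
  match fuel with
  | 0 => 0
  | fuel + 1 =>
    if count + PySem.List.len level < m then
      solutionLoopB fuel m (count + PySem.List.len level)
        (level.flatMap (fun vu =>
          ((PySem.List.pyRange 0 10 1).filter (fun d => !vu.2.contains d)).map
            (fun d => (vu.1 * 10 + d, vu.2 ++ [d]))))
    else
      (PySem.List.pyGetD level (m - 1 - count) (0, [])).1 + 1

def solution_alt (n : Int) : Int :=
  if n = 1 then 1
  else solutionLoopB 11 (n - 1) 0 ((PySem.List.pyRange 1 10 1).map (fun d => (d, [d])))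

-- ===== PRECONDITION & SPEC =====
-- A diverges (infinite while-loop) for n ≤ 0 and for n > 8877691 (there are only
-- 8877690 positive integers with pairwise-distinct decimal digits); Pre_ is exactly
-- the set of inputs on which the Python A returns.
def Pre_solution (n : Int) : Prop := 1 ≤ n ∧ n ≤ 8877691
instance (n : Int) : Decidable (Pre_solution n) := by unfold Pre_solution; infer_instance
def pvWitness_solution : Int := 12

def Spec_solution (n : Int) (out : Int) : Prop := out = solution_alt n
instance (n : Int) (out : Int) : Decidable (Spec_solution n out) := by unfold Spec_solution; infer_instance

-- ===== CLAIM (what is proved, stated in full; the proofs are below) =====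
def Claim_equal_solution : Prop := ∀ (n : Int), Dom_solution n → Pre_solution n → Spec_solution n (solution n)

-- ===== LEMMAS AND PROOFS =====

-- Nat-level models of the two loops
def ddb (x : Nat) : Bool := decide (x ≠ 0) && decide ((Nat.digits 10 x).Nodup)

def loopANat : Nat → Nat → Nat → Nat → Nat
  | 0, _, _, result => result
  | fuel + 1, n, num, result =>
    if num = n then result
    else if ¬ (Nat.digits 10 result).Nodup then loopANat fuel n num (result + 1)
    else loopANat fuel n (num + 1) (result + 1)

def extN (vu : Nat × List Nat) : List (Nat × List Nat) :=
  ((List.range 10).filter (fun d => !vu.2.contains d)).map (fun d => (vu.1 * 10 + d, vu.2 ++ [d]))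

def loopBNat : Nat → Nat → Nat → List (Nat × List Nat) → Nat
  | 0, _, _, _ => 0
  | fuel + 1, m, count, level =>
    if count + level.length < m then
      loopBNat fuel m (count + level.length) (level.flatMap extN)
    else (level.getD (m - 1 - count) (0, [])).1 + 1

def lvlN : Nat → List (Nat × List Nat)
  | 0 => []
  | 1 => (List.range' 1 9).map (fun d => (d, [d]))
  | (L + 2) => (lvlN (L + 1)).flatMap extN

def cnt (r : Nat) : Nat := ((List.range r).filter ddb).length

def EN : List Nat := (List.range' 1 9999999999).filter ddb

def CV (K : Nat) : List Nat := (List.range K).flatMap (fun i => (lvlN (i + 1)).map Prod.fst)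

def castE (vu : Nat × List Nat) : Int × List Int := ((vu.1 : Int), vu.2.map Int.ofNat)


lemma dedup_subperm {α : Type} [BEq α] [LawfulBEq α] (xs : List α) :
    List.Subperm (PySem.List.dedup xs) xs := by
  refine (PySem.Set.nodup_ofList xs).subperm ?_
  intro y hy
  exact (PySem.Set.mem_ofList xs y).mp hy

lemma dedup_len_lt_iff {α : Type} [BEq α] [LawfulBEq α] (xs : List α) :
    (PySem.List.dedup xs).length < xs.length ↔ ¬ xs.Nodup := by
  constructor
  · intro hlt hnd
    have h2 : List.Subperm xs (PySem.List.dedup xs) := by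
      refine hnd.subperm ?_
      intro y hy
      exact (PySem.Set.mem_ofList xs y).mpr hy
    exact absurd h2.length_le (by omega)
  · intro h
    rcases Nat.lt_or_ge (PySem.List.dedup xs).length xs.length with hlt | hge
    · exact hlt
    · exact absurd ((((dedup_subperm xs)).perm_of_length_le hge).nodup_iff.mp
        (PySem.Set.nodup_ofList xs)) h

lemma digitChar_inj (a b : Nat) (ha : a < 10) (hb : b < 10)
    (h : Nat.digitChar a = Nat.digitChar b) : a = b := by
  interval_cases a <;> interval_cases b <;> simp_all [Nat.digitChar]

lemma toDigits_eq (r : Nat) (h : 0 < r) :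
    Nat.toDigits 10 r = ((Nat.digits 10 r).map Nat.digitChar).reverse := by
  induction r using Nat.strong_induction_on with
  | _ r ih =>
    rcases Nat.lt_or_ge r 10 with hr | hr
    · rw [Nat.toDigits_of_lt_base hr, Nat.digits_def' (by norm_num) h,
        Nat.mod_eq_of_lt hr, Nat.div_eq_of_lt hr]
      simp
    · rw [Nat.toDigits_of_base_le (by norm_num) hr, Nat.digits_def' (by norm_num) h,
        ih (r / 10) (Nat.div_lt_self h (by norm_num)) (by omega)]
      simp

lemma condA_iff (r : Nat) :
    ((PySem.Str.len (PySem.Int.toStr (r : Int)) ≠ 1 ∧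
      PySem.Str.len (PySem.Int.toStr (r : Int)) >
        PySem.Set.len (PySem.Set.ofList (PySem.Int.toStr (r : Int)).toList))
      ↔ ¬ (Nat.digits 10 r).Nodup) := by
  have hchars : (PySem.Int.toStr (r : Int)).toList = Nat.toDigits 10 r := by
    rw [PySem.Int.toList_toStr]
    unfold PySem.Int.toChars
    simp
  rcases Nat.eq_zero_or_pos r with rfl | hr
  · rw [PySem.Str.len_eq, hchars]
    norm_num [Nat.toDigits_of_lt_base]
  · rw [PySem.Str.len_eq, hchars, toDigits_eq r hr]
    have hnd : (((Nat.digits 10 r).map Nat.digitChar).reverse).Nodup ↔ (Nat.digits 10 r).Nodup := by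
      rw [List.nodup_reverse]
      constructor
      · exact fun hh => hh.of_map
      · intro hh
        refine hh.map_on ?_
        intro x hx y hy hxy
        exact digitChar_inj x y (Nat.digits_lt_base (by norm_num) hx)
          (Nat.digits_lt_base (by norm_num) hy) hxy
    have hlen1 : (((Nat.digits 10 r).map Nat.digitChar).reverse).length = (Nat.digits 10 r).length := by
      simp
    have hddlt := dedup_len_lt_iff (((Nat.digits 10 r).map Nat.digitChar).reverse)
    have hset : PySem.Set.ofList (((Nat.digits 10 r).map Nat.digitChar).reverse)
        = PySem.List.dedup (((Nat.digits 10 r).map Nat.digitChar).reverse) := rfl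
    rw [hset]
    unfold PySem.Set.len
    constructor
    · rintro ⟨h1, h2⟩
      rw [← hnd, ← hddlt]
      omega
    · intro h
      have h2 : ¬ (((Nat.digits 10 r).map Nat.digitChar).reverse).Nodup := by
        rw [hnd]; exact h
      have h3 := hddlt.mpr h2
      have h4 : (Nat.digits 10 r).length ≠ 1 := by
        intro hl
        apply h
        rcases (Nat.digits 10 r) with _ | ⟨a, _ | ⟨b, t⟩⟩ <;> simp_all
      constructor
      · omega
      · omega

lemma bridgeA (fuel : Nat) : ∀ (n num result : Nat),
    solutionLoopA fuel n num result = (loopANat fuel n num result : Int) := by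
  induction fuel with
  | zero => intro n num result; rfl
  | succ fuel ih =>
    intro n num result
    rw [solutionLoopA, loopANat]
    by_cases h1 : (num : Int) = (n : Int)
    · have : num = n := by exact_mod_cast h1
      simp [h1, this]
    · have h1' : ¬ (num = n) := by intro hh; exact h1 (by exact_mod_cast hh)
      simp only [h1, h1', if_false]
      by_cases h2 : ¬ (Nat.digits 10 result).Nodup
      · rw [if_pos ((condA_iff result).mpr h2), if_pos h2]
        exact ih n num (result + 1)
      · rw [if_neg (fun hc => h2 ((condA_iff result).mp hc)), if_neg h2]
        exact ih n (num + 1) (result + 1)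


lemma cnt_succ (r : Nat) : cnt (r + 1) = cnt r + (if ddb r then 1 else 0) := by
  unfold cnt
  rw [List.range_succ, List.filter_append]
  by_cases h : ddb r <;> simp [h]

lemma cnt_mono {r s : Nat} (h : r ≤ s) : cnt r ≤ cnt s := by
  induction s with
  | zero =>
    have : r = 0 := by omega
    simp [this]
  | succ s ih =>
    rcases Nat.lt_or_ge r (s + 1) with hl | hg
    · have h2 := ih (by omega)
      rw [cnt_succ]
      split <;> omega
    · have : r = s + 1 := by omega
      subst this
      exact le_rfl

lemma lemA (fuel : Nat) : ∀ (n num result rstar : Nat),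
    1 ≤ num → num ≤ n → 1 ≤ result → result ≤ rstar →
    cnt result = num - 1 → cnt rstar = n - 1 →
    (rstar = 1 ∨ ddb (rstar - 1) = true) →
    rstar - result ≤ fuel →
    loopANat fuel n num result = rstar := by
  induction fuel with
  | zero =>
    intro n num result rstar h1 h2 h3 h4 h5 h6 h7 h8
    have : result = rstar := by omega
    subst this
    rfl
  | succ fuel ih =>
    intro n num result rstar h1 h2 h3 h4 h5 h6 h7 h8
    have key : num = n → result = rstar := by
      intro hnn
      subst hnn
      by_contra hne
      have hlt : result < rstar := by omega
      rcases h7 with hh | hh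
      · omega
      · have hs : cnt (rstar - 1 + 1) = cnt (rstar - 1) + 1 := by
          rw [cnt_succ, hh]; simp
        have h9 : rstar - 1 + 1 = rstar := by omega
        rw [h9] at hs
        have := cnt_mono (show result ≤ rstar - 1 by omega)
        omega
    rw [loopANat]
    by_cases hnn : num = n
    · rw [if_pos hnn]; exact key hnn
    · rw [if_neg hnn]
      have hltr : result < rstar := by
        by_contra hc
        have : result = rstar := by omega
        subst this
        have : num = n := by omega
        exact hnn this
      have hddbr : ddb result = decide ((Nat.digits 10 result).Nodup) := by
        unfold ddb
        simp [show result ≠ 0 by omega]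
      by_cases hnd : ¬ (Nat.digits 10 result).Nodup
      · rw [if_pos hnd]
        refine ih n num (result + 1) rstar h1 h2 (by omega) (by omega) ?_ h6 h7 (by omega)
        rw [cnt_succ, hddbr]
        simp [hnd, h5]
      · rw [if_neg hnd]
        rw [not_not] at hnd
        have hcs : cnt (result + 1) = num := by
          rw [cnt_succ, hddbr]
          simp [hnd]
          omega
        have hnum_lt : num < n := by omega
        refine ih n (num + 1) (result + 1) rstar (by omega) (by omega) (by omega) (by omega) (by omega) h6 h7 (by omega)

lemma rangeSplit (n : Nat) : ∀ a, (List.range' a n).flatMap (fun v => List.range' (10 * v) 10)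
    = List.range' (10 * a) (10 * n) := by
  induction n with
  | zero => intro a; simp
  | succ n ih =>
    intro a
    rw [List.range'_succ, List.flatMap_cons, ih (a + 1)]
    have : 10 * (a + 1) = 10 * a + 1 * 10 := by ring
    rw [this, List.range'_append]
    congr 1
    ring

lemma digits_cons (v d : Nat) (hv : 0 < v) (hd : d < 10) :
    Nat.digits 10 (10 * v + d) = d :: Nat.digits 10 v := by
  rw [Nat.digits_def' (by norm_num : (1:Nat) < 10) (by omega)]
  congr 1
  · omega
  · congr 1
    omega

lemma lvl_char : ∀ (L : Nat),
    lvlN (L + 1) = ((List.range' (10 ^ L) (9 * 10 ^ L)).filter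
        (fun v => decide ((Nat.digits 10 v).Nodup))).map
      (fun v => (v, (Nat.digits 10 v).reverse)) := by
  intro L
  induction L with
  | zero =>
    show lvlN 1 = _
    rw [lvlN]
    norm_num
    rw [show (9 : Nat) = 8 + 1 by rfl]
    simp only [List.range'_succ]
    norm_num [Nat.digits_def']
  | succ L ih =>
    show (lvlN (L + 1)).flatMap extN = _
    rw [ih, List.flatMap_map]
    have hsplit : List.range' (10 ^ (L + 1)) (9 * 10 ^ (L + 1))
        = (List.range' (10 ^ L) (9 * 10 ^ L)).flatMap (fun v => List.range' (10 * v) 10) := by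
      rw [rangeSplit]
      congr 1 <;> ring
    rw [hsplit, List.filter_flatMap, List.map_flatMap]
    have hflt : ∀ (l : List Nat) (f : Nat → List (Nat × List Nat)),
        (l.filter (fun v => decide ((Nat.digits 10 v).Nodup))).flatMap f
          = l.flatMap (fun v => if (Nat.digits 10 v).Nodup then f v else []) := by
      intro l f
      induction l with
      | nil => rfl
      | cons x l ihl =>
        by_cases hx : (Nat.digits 10 x).Nodup <;>
          simp [hx, ihl]
    rw [hflt]
    unfold List.flatMap
    congr 1
    apply List.map_congr_left
    intro v hv
    have hv1 : 1 ≤ v := by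
      have := (List.mem_range'_1.mp hv).1
      have hp : 1 ≤ 10 ^ L := Nat.one_le_pow _ _ (by norm_num)
      omega
    by_cases hdv : (Nat.digits 10 v).Nodup
    · rw [if_pos hdv]
      have hblock : List.range' (10 * v) 10 = (List.range 10).map (fun d => 10 * v + d) :=
        List.range'_eq_map_range
      rw [hblock, List.filter_map]
      have hpred : (List.range 10).filter ((fun v => decide ((Nat.digits 10 v).Nodup)) ∘ (fun d => 10 * v + d))
          = (List.range 10).filter (fun d => !((Nat.digits 10 v).reverse).contains d) := by
        apply List.filter_congr
        intro d hd
        have hd10 : d < 10 := List.mem_range.mp hd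
        simp only [Function.comp]
        simp [digits_cons v d (by omega) hd10, List.nodup_cons, hdv]
      rw [hpred]
      unfold extN
      rw [List.map_map]
      apply List.map_congr_left
      intro d hd
      have hd10 : d < 10 := List.mem_range.mp (List.mem_of_mem_filter hd)
      simp only [Function.comp]
      rw [digits_cons v d (by omega) hd10]
      simp [Nat.mul_comm]
    · rw [if_neg hdv]
      have : (List.range' (10 * v) 10).filter (fun w => decide ((Nat.digits 10 w).Nodup)) = [] := by
        rw [List.filter_eq_nil_iff]
        intro w hw
        have hw' := List.mem_range'_1.mp hw
        have hwd : w = 10 * v + (w - 10 * v) := by omega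
        have hlt : w - 10 * v < 10 := by omega
        rw [hwd, digits_cons v _ (by omega) hlt]
        simp only [decide_eq_true_eq, List.nodup_cons]
        tauto
      rw [this]
      simp


lemma ddb_eq_on_pos (x : Nat) (h : 0 < x) : ddb x = decide ((Nat.digits 10 x).Nodup) := by
  unfold ddb
  simp [show x ≠ 0 by omega]

lemma lvl_fst (L : Nat) : (lvlN (L + 1)).map Prod.fst
    = (List.range' (10 ^ L) (9 * 10 ^ L)).filter ddb := by
  rw [lvl_char, List.map_map]
  have : (Prod.fst ∘ fun v => ((v : Nat), (Nat.digits 10 v).reverse)) = id := rfl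
  rw [this, List.map_id]
  apply List.filter_congr
  intro x hx
  have h1 : 1 ≤ x := by
    have := (List.mem_range'_1.mp hx).1
    have hp : 1 ≤ 10 ^ L := Nat.one_le_pow _ _ (by norm_num)
    omega
  rw [ddb_eq_on_pos x (by omega)]

lemma rangeFlat : ∀ K, (List.range K).flatMap (fun L => List.range' (10 ^ L) (9 * 10 ^ L))
    = List.range' 1 (10 ^ K - 1) := by
  intro K
  induction K with
  | zero => simp
  | succ K ih =>
    rw [List.range_succ, List.flatMap_append, ih]
    simp only [List.flatMap_cons, List.flatMap_nil, List.append_nil]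
    have h1 : 1 ≤ 10 ^ K := Nat.one_le_pow _ _ (by norm_num)
    have happ := List.range'_append (s := 1) (m := 10 ^ K - 1) (n := 9 * 10 ^ K) (step := 1)
    rw [show 1 + 1 * (10 ^ K - 1) = 10 ^ K by omega] at happ
    rw [happ]
    congr 1
    have : 10 ^ (K + 1) = 10 * 10 ^ K := by ring
    omega

lemma EN_eq : EN = CV 10 := by
  unfold EN CV
  simp only [lvl_fst]
  rw [← List.filter_flatMap, rangeFlat]
  norm_num

lemma EN_sorted : EN.Pairwise (· < ·) := by
  unfold EN
  exact List.Pairwise.sublist (List.filter_sublist) (by simpa using List.pairwise_lt_range' (s := 1) (n := 9999999999) 1)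

lemma EN_mem {x : Nat} (h : x ∈ EN) : ddb x = true ∧ 1 ≤ x ∧ x < 10000000000 := by
  unfold EN at h
  have h1 := List.mem_of_mem_filter h
  have h2 := List.of_mem_filter h
  have h3 := List.mem_range'_1.mp h1
  refine ⟨h2, by omega, by omega⟩

lemma filter_not_mem_len (us : List Nat) (h1 : us.Nodup) (h2 : ∀ x ∈ us, x < 10) :
    ((List.range 10).filter (fun d => !us.contains d)).length = 10 - us.length := by
  have hpos : ((List.range 10).filter (fun d => us.contains d)).length = us.length := by
    have ha : List.Subperm ((List.range 10).filter (fun d => us.contains d)) us := by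
      refine (List.Nodup.filter _ List.nodup_range).subperm ?_
      intro y hy
      have := List.of_mem_filter hy
      simpa [List.contains_iff_mem] using this
    have hb : List.Subperm us ((List.range 10).filter (fun d => us.contains d)) := by
      refine h1.subperm ?_
      intro y hy
      exact List.mem_filter.mpr ⟨List.mem_range.mpr (h2 y hy), by simpa [List.contains_iff_mem]⟩
    have := ha.length_le
    have := hb.length_le
    omega
  have htot := List.length_eq_length_filter_add (fun d => us.contains d) (l := List.range 10)
  have hr : (List.range 10).length = 10 := List.length_range
  omega


lemma len_lvl_succ (L : Nat) : (lvlN (L + 2)).length = (lvlN (L + 1)).length * (9 - L) := by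
  show ((lvlN (L + 1)).flatMap extN).length = _
  rw [List.length_flatMap]
  have hmem : ∀ vu ∈ lvlN (L + 1), (extN vu).length = 9 - L := by
    intro vu hvu
    rw [lvl_char] at hvu
    obtain ⟨v, hv, rfl⟩ := List.mem_map.mp hvu
    have hvr := List.mem_range'_1.mp (List.mem_of_mem_filter hv)
    have hnd : (Nat.digits 10 v).Nodup := by simpa using List.of_mem_filter hv
    have hp : 1 ≤ 10 ^ L := Nat.one_le_pow _ _ (by norm_num)
    have hlen : (Nat.digits 10 v).length = L + 1 := by
      rw [Nat.length_digits 10 v (by norm_num) (by omega)]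
      have : Nat.log 10 v = L := by
        apply Nat.log_eq_of_pow_le_of_lt_pow (by omega)
        have : 10 ^ (L + 1) = 10 ^ L + 9 * 10 ^ L := by ring
        omega
      omega
    unfold extN
    rw [List.length_map]
    simp only
    rw [filter_not_mem_len _ (by simpa using hnd) (by
      intro x hx
      exact Nat.digits_lt_base (by norm_num) (List.mem_reverse.mp hx))]
    rw [List.length_reverse, hlen]
    omega
  calc ((lvlN (L + 1)).map fun a => (extN a).length).sum
      = ((lvlN (L + 1)).map fun _ => 9 - L).sum := by
        apply congrArg
        exact List.map_congr_left hmem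
    _ = (lvlN (L + 1)).length * (9 - L) := by
        rw [List.map_const', List.sum_replicate, smul_eq_mul]

lemma len_lvl1 : (lvlN 1).length = 9 := by
  rw [lvlN]; simp

def desc : Nat → Nat
  | 0 => 1
  | (L + 1) => desc L * (9 - L)

lemma len_lvl_formula : ∀ L, (lvlN (L + 1)).length = 9 * desc L := by
  intro L
  induction L with
  | zero => simpa [desc] using len_lvl1
  | succ L ih =>
    rw [len_lvl_succ L, ih, desc]
    ring

lemma EN_len : EN.length = 8877690 := by
  rw [EN_eq]
  unfold CV
  rw [List.length_flatMap]
  have hm : (List.range 10).map (fun i => ((lvlN (i + 1)).map Prod.fst).length)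
      = (List.range 10).map (fun i => 9 * desc i) := by
    apply List.map_congr_left
    intro i _
    rw [List.length_map, len_lvl_formula]
  rw [hm]
  decide


lemma cnt_eq_segment (r : Nat) (h1 : 1 ≤ r) : cnt r = ((List.range' 1 (r - 1)).filter ddb).length := by
  unfold cnt
  have hr : List.range r = 0 :: List.range' 1 (r - 1) := by
    rw [List.range_eq_range', show r = (r - 1) + 1 by omega, List.range'_succ]
    norm_num
  rw [hr, List.filter_cons]
  have : ddb 0 = false := by decide
  simp [this]

lemma EN_split (r : Nat) (h1 : 1 ≤ r) (h2 : r ≤ 10000000000) :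
    EN = ((List.range' 1 (r - 1)).filter ddb) ++ ((List.range' r (10000000000 - r)).filter ddb) := by
  unfold EN
  rw [← List.filter_append]
  congr 1
  have happ := List.range'_append (s := 1) (m := r - 1) (n := 10000000000 - r) (step := 1)
  rw [show 1 + 1 * (r - 1) = r by omega] at happ
  rw [happ]
  congr 1
  omega

lemma cnt_getE (k : Nat) (h : k < EN.length) : cnt (EN[k] + 1) = k + 1 := by
  have hx : EN[k] ∈ EN := List.getElem_mem h
  obtain ⟨hddb, hx1, hx2⟩ := EN_mem hx
  set x := EN[k] with hxdef
  have hsplit := EN_split (x + 1) (by omega) (by omega)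
  set F := (List.range' 1 (x + 1 - 1)).filter ddb with hF
  set G := (List.range' (x + 1) (10000000000 - (x + 1))).filter ddb with hG
  have hFlt : ∀ y ∈ F, y < x + 1 := by
    intro y hy
    have := List.mem_range'_1.mp (List.mem_of_mem_filter hy)
    omega
  have hGge : ∀ y ∈ G, x + 1 ≤ y := by
    intro y hy
    have := List.mem_range'_1.mp (List.mem_of_mem_filter hy)
    omega
  have hpw := List.pairwise_iff_getElem.mp EN_sorted
  have hlenEN : EN.length = F.length + G.length := by
    rw [hsplit, List.length_append]
  have hk1 : k < F.length := by
    by_contra hle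
    push Not at hle
    have hkG : x = G[k - F.length]'(by omega) := by
      rw [hxdef, List.getElem_of_eq hsplit h, List.getElem_append_right (by omega)]
    have hxG : x ∈ G := by
      rw [hkG]
      exact List.getElem_mem _
    have := hGge _ hxG
    omega
  have hk2 : F.length ≤ k + 1 := by
    by_contra hgt
    push Not at hgt
    have hlt : k + 1 < EN.length := by omega
    have hmemF : EN[k+1]'hlt ∈ F := by
      rw [List.getElem_of_eq hsplit hlt, List.getElem_append_left (by omega)]
      exact List.getElem_mem _
    have h1 := hFlt _ hmemF
    have h2 := hpw k (k+1) (by omega) hlt (by omega)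
    omega
  have hcnt := cnt_eq_segment (x + 1) (by omega)
  rw [hcnt, ← hF]
  -- F.length = k + 1 : need k < F.length and F.length ≤ k + 1
  omega


lemma CV_succ (K : Nat) : CV (K + 1) = CV K ++ (lvlN (K + 1)).map Prod.fst := by
  unfold CV
  rw [List.range_succ, List.flatMap_append]
  simp

lemma CV_split (a b : Nat) : CV (a + b)
    = CV a ++ (List.range' a b).flatMap (fun i => (lvlN (i + 1)).map Prod.fst) := by
  unfold CV
  rw [List.range_eq_range', List.range_eq_range',
    show List.range' 0 (a + b) = List.range' 0 a ++ List.range' a b from ?_, List.flatMap_append]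
  have happ := List.range'_append (s := 0) (m := a) (n := b) (step := 1)
  rw [show 0 + 1 * a = a by omega] at happ
  rw [happ]

lemma CV_prefix (K : Nat) (h : K ≤ 10) : ∃ rest, CV 10 = CV K ++ rest := by
  refine ⟨(List.range' K (10 - K)).flatMap (fun i => (lvlN (i + 1)).map Prod.fst), ?_⟩
  rw [show (10 : Nat) = K + (10 - K) by omega, CV_split]
  have : K + (10 - K) - K = 10 - K := by omega
  rw [this]

lemma lemB (fuel : Nat) : ∀ (K m : Nat),
    K < 10 → 1 ≤ m → m ≤ EN.length → (CV K).length < m → 10 - K ≤ fuel →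
    loopBNat fuel m (CV K).length (lvlN (K + 1)) = EN.getD (m - 1) 0 + 1 := by
  induction fuel with
  | zero => intro K m hK hm1 hm2 hcv hfuel; omega
  | succ fuel ih =>
    intro K m hK hm1 hm2 hcv hfuel
    rw [loopBNat]
    have hCVs : (CV (K + 1)).length = (CV K).length + (lvlN (K + 1)).length := by
      rw [CV_succ, List.length_append, List.length_map]
    by_cases hc : (CV K).length + (lvlN (K + 1)).length < m
    · rw [if_pos hc]
      have hK9 : K + 1 < 10 := by
        by_contra hX
        have hK9' : K + 1 = 10 := by omega
        have : (CV (K + 1)).length = EN.length := by rw [hK9', ← EN_eq]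
        omega
      have hnext : (lvlN (K + 1)).flatMap extN = lvlN (K + 2) := rfl
      rw [← hCVs, hnext]
      exact ih (K + 1) m hK9 hm1 hm2 (by omega) (by omega)
    · rw [if_neg hc]
      have hj : m - 1 - (CV K).length < (lvlN (K + 1)).length := by omega
      have hmlt : m - 1 < EN.length := by omega
      -- EN[m-1] = (map fst (lvlN (K+1)))[m-1-count]
      obtain ⟨rest, hrest⟩ : ∃ rest, EN = CV K ++ (lvlN (K + 1)).map Prod.fst ++ rest := by
        obtain ⟨rest, hr⟩ := CV_prefix (K + 1) (by omega)
        exact ⟨rest, by rw [EN_eq, hr, CV_succ]⟩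
      have hgetE : EN[m - 1]'hmlt = ((lvlN (K + 1)).map Prod.fst)[m - 1 - (CV K).length]'(by
          rw [List.length_map]; exact hj) := by
        rw [List.getElem_of_eq hrest hmlt,
          List.getElem_append_left (by rw [List.length_append, List.length_map]; omega),
          List.getElem_append_right (by omega)]
      have hgetD : EN.getD (m - 1) 0 = EN[m - 1]'hmlt := List.getD_eq_getElem _ _ hmlt
      have hlvlD : (lvlN (K + 1)).getD (m - 1 - (CV K).length) (0, []) =
          (lvlN (K + 1))[m - 1 - (CV K).length]'hj := List.getD_eq_getElem _ _ hj
      rw [hgetD, hgetE, hlvlD, List.getElem_map]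

lemma pyR10 : PySem.List.pyRange 0 10 1 = (List.range 10).map (fun k : Nat => (k : Int)) := by
  rw [PySem.List.pyRange_one]
  norm_num
  rfl

lemma mem_map_cast (l : List Nat) (d : Nat) :
    (Int.ofNat d ∈ l.map Int.ofNat) ↔ d ∈ l :=
  List.mem_map_of_injective (fun a b h => by
    have : (a : Int) = (b : Int) := h
    exact_mod_cast this)

lemma extN_cast (vu : Nat × List Nat) :
    ((PySem.List.pyRange 0 10 1).filter (fun d => !(castE vu).2.contains d)).map
        (fun d => ((castE vu).1 * 10 + d, (castE vu).2 ++ [d]))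
      = (extN vu).map castE := by
  rw [pyR10, List.filter_map, List.map_map]
  unfold extN
  rw [List.map_map]
  rw [List.filter_congr (q := fun d : Nat => !vu.2.contains d) ?_]
  · apply List.map_congr_left
    intro d hd
    simp only [Function.comp, castE]
    rw [Prod.mk.injEq]
    refine ⟨by push_cast; ring, ?_⟩
    rw [List.map_append]
    rfl
  · intro d hd
    simp only [Function.comp, castE]
    congr 1
    rw [Bool.eq_iff_iff, List.contains_iff_mem, List.contains_iff_mem]
    exact mem_map_cast vu.2 d

lemma getD_map_castE (xs : List (Nat × List Nat)) (k : Nat) :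
    (xs.map castE).getD k (0, []) = castE (xs.getD k (0, [])) := by
  rcases Nat.lt_or_ge k xs.length with hk | hk
  · rw [List.getD_eq_getElem _ _ (by rw [List.length_map]; exact hk),
      List.getD_eq_getElem _ _ hk, List.getElem_map]
  · rw [List.getD_eq_default _ _ (by rw [List.length_map]; exact hk),
      List.getD_eq_default _ _ hk]
    rfl

lemma bridgeB (fuel : Nat) : ∀ (m count : Nat) (level : List (Nat × List Nat)),
    count < m →
    solutionLoopB fuel m count (level.map castE) = (loopBNat fuel m count level : Int) := by
  induction fuel with
  | zero => intro m count level h; rfl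
  | succ fuel ih =>
    intro m count level h
    rw [solutionLoopB, loopBNat]
    have hlen : PySem.List.len (level.map castE) = (level.length : Int) := by
      rw [PySem.List.len_eq, List.length_map]
    by_cases hc : count + level.length < m
    · rw [if_pos (by rw [hlen]; exact_mod_cast hc), if_pos hc]
      have hflat : (level.map castE).flatMap (fun vu =>
          ((PySem.List.pyRange 0 10 1).filter (fun d => !vu.2.contains d)).map
            (fun d => (vu.1 * 10 + d, vu.2 ++ [d])))
          = (level.flatMap extN).map castE := by
        rw [List.flatMap_map, List.map_flatMap]
        have hfun : (fun vu : Nat × List Nat =>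
            ((PySem.List.pyRange 0 10 1).filter (fun d => !(castE vu).2.contains d)).map
              (fun d => ((castE vu).1 * 10 + d, (castE vu).2 ++ [d])))
            = fun vu => (extN vu).map castE := funext extN_cast
        exact congrArg (List.flatMap · level) hfun
      rw [hlen, hflat, show (count : Int) + (level.length : Int) = ((count + level.length : Nat) : Int) by push_cast; ring]
      exact ih m (count + level.length) (level.flatMap extN) (by omega)
    · rw [if_neg (by rw [hlen]; exact_mod_cast hc), if_neg hc]
      have hidx : (m : Int) - 1 - (count : Int) = ((m - 1 - count : Nat) : Int) := by
        push_cast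
        omega
      rw [hidx, PySem.List.pyGetD_natCast, getD_map_castE]
      unfold castE
      push_cast
      ring

lemma initB : (PySem.List.pyRange 1 10 1).map (fun d => (d, ([d] : List Int)))
    = (lvlN 1).map castE := by
  rw [PySem.List.pyRange_one]
  norm_num
  rw [lvlN, List.range'_eq_map_range, List.map_map, List.map_map]
  rw [show Int.toNat 9 = 9 from rfl]
  apply List.map_congr_left
  intro k _
  simp only [Function.comp, castE]
  rw [Prod.mk.injEq]
  constructor
  · push_cast
    ring
  · push_cast
    rfl

-- ===== VERDICT (by name: the statement is the Claim_ definition above) =====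
lemma cnt_one : cnt 1 = 0 := by decide

theorem solution_spec : Claim_equal_solution := by
  unfold Claim_equal_solution
  intro n _ hpre
  unfold Spec_solution
  obtain ⟨h1, h2⟩ := hpre
  set nn := n.toNat with hnn
  have hn : n = (nn : Int) := by omega
  have hA : solution n = ((loopANat 10000000000 nn 1 1 : Nat) : Int) := by
    unfold solution
    rw [hn]
    have := bridgeA 10000000000 nn 1 1
    simpa using this
  rcases Nat.eq_or_lt_of_le (show 1 ≤ nn by omega) with hone | hge2
  · -- nn = 1
    have hnn1 : nn = 1 := hone.symm
    have hA1 : loopANat 10000000000 nn 1 1 = 1 := by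
      rw [hnn1]
      exact lemA 10000000000 1 1 1 1 le_rfl le_rfl le_rfl le_rfl cnt_one cnt_one (Or.inl rfl) (by omega)
    rw [hA, hA1]
    unfold solution_alt
    rw [if_pos (by omega)]
    rfl
  · -- nn ≥ 2
    set m := nn - 1 with hm
    have hm1 : 1 ≤ m := by omega
    have hmlen : m ≤ EN.length := by rw [EN_len]; omega
    have hidx : m - 1 < EN.length := by omega
    set x := EN[m - 1]'hidx with hx
    obtain ⟨hxd, hx1, hx2⟩ := EN_mem (hx ▸ List.getElem_mem hidx)
    have hcntx : cnt (x + 1) = m := by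
      rw [hx]
      rw [cnt_getE (m - 1) hidx]
      omega
    have hAval : loopANat 10000000000 nn 1 1 = x + 1 := by
      refine lemA 10000000000 nn 1 1 (x + 1) le_rfl (by omega) le_rfl (by omega) cnt_one ?_ ?_ (by omega)
      · rw [hcntx]
      · right
        simpa using hxd
    have hBval : solution_alt n = ((x + 1 : Nat) : Int) := by
      unfold solution_alt
      rw [if_neg (by omega), initB, hn,
        show ((nn : Int)) - 1 = (m : Int) by omega,
        show (0 : Int) = ((0 : Nat) : Int) from rfl,
        bridgeB 11 m 0 (lvlN 1) (by exact hm1)]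
      have hlb := lemB 11 0 m (by omega) hm1 hmlen (by have h0 : (CV 0).length = 0 := rfl; rw [h0]; omega) (by omega)
      have h0 : (CV 0).length = 0 := rfl
      rw [h0] at hlb
      have hlb' : loopBNat 11 m 0 (lvlN 1) = EN.getD (m - 1) 0 + 1 := hlb
      rw [hlb', List.getD_eq_getElem _ _ hidx]
    rw [hA, hAval, hBval]
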